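-- pv_equiv track=rewrite | github.com/ognile/commentfront | backend/campaign_reliability_audit.py | classify_failure_category
-- ===== SOURCE A (Python) =====
-- from typing import Any, Dict, Iterable, List, Optional, Set
--
-- def classify_failure_category(error: Optional[str]) -> str:
--     text = (error or "").lower()
--     if not text:
--         return "other"
--
--     if any(token in text for token in [
--         "checkpoint",
--         "account has been locked",
--         "account locked",
--         "restriction",
--         "restricted",
--         "throttle",
--         "throttled",
--         "banned",
--         "ban ",
--     ]):
--         return "restriction/checkpoint"
--
--     if any(token in text for token in [
--         "err_tunnel_connection_failed",
--         "err_empty_response",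
--         "net::",
--         "proxy",
--         "connection",
--         "network",
--         "timeout",
--         "timed out",
--         "tunnel",
--     ]):
--         return "infra/transport"
--
--     if any(token in text for token in [
--         "comments not opened",
--         "write a comment",
--         "could not open comments",
--         "comment button",
--     ]):
--         return "comment-open"
--
--     if any(token in text for token in [
--         "typed text not visible",
--         "text not visible",
--         "comment input field",
--         "input field not visible",
--     ]):
--         return "input-visibility"
--
--     if any(token in text for token in [
--         "comment not posted",
--         "no comments are visible",
--         "does not display any posted comments",
--         "no posted comments",
--     ]):
--         return "post-verification"
--
--     if any(token in text for token in [
--         "post not visible",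
--         "page.goto",
--         "navigation to",
--         "comments section is empty",
--         "could not determine if post loaded",
--     ]):
--         return "page-load/navigation"
--
--     return "other"
-- ===== SOURCE B (Python) =====
-- # B: naive multi-pattern text scan — walk the text position by position, test every
-- # token with startswith at that position, and keep the minimum category priority
-- # seen; the answer is the label of that priority. Objective: alternative algorithm
-- # (position-driven scan + min aggregation instead of A's per-category if/any chain).
--
-- _LABELS = ["restriction/checkpoint", "infra/transport", "comment-open",
--            "input-visibility", "post-verification", "page-load/navigation", "other"]
--
-- _TOKENS = [
--     ("checkpoint", 0), ("account has been locked", 0), ("account locked", 0),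
--     ("restriction", 0), ("restricted", 0), ("throttle", 0), ("throttled", 0),
--     ("banned", 0), ("ban ", 0),
--     ("err_tunnel_connection_failed", 1), ("err_empty_response", 1), ("net::", 1),
--     ("proxy", 1), ("connection", 1), ("network", 1), ("timeout", 1),
--     ("timed out", 1), ("tunnel", 1),
--     ("comments not opened", 2), ("write a comment", 2),
--     ("could not open comments", 2), ("comment button", 2),
--     ("typed text not visible", 3), ("text not visible", 3),
--     ("comment input field", 3), ("input field not visible", 3),
--     ("comment not posted", 4), ("no comments are visible", 4),
--     ("does not display any posted comments", 4), ("no posted comments", 4),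
--     ("post not visible", 5), ("page.goto", 5), ("navigation to", 5),
--     ("comments section is empty", 5), ("could not determine if post loaded", 5),
-- ]
--
-- def classify_failure_category(error):
--     text = (error or "").lower()
--     best = 6
--     for i in range(len(text)):
--         for token, pri in _TOKENS:
--             if pri < best and text.startswith(token, i):
--                 best = pri
--     return _LABELS[best]
-- ===== Notes on version B (the rewrite author's own statement) =====
-- stated objective: alternative
-- what changed: Replaced the six per-category if/any substring blocks by a naive multi-pattern text scanner: one pass over the text positions testing each token with startswith there, aggregating the minimum category priority, then mapping that priority to its label.
import Mathlib
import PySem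

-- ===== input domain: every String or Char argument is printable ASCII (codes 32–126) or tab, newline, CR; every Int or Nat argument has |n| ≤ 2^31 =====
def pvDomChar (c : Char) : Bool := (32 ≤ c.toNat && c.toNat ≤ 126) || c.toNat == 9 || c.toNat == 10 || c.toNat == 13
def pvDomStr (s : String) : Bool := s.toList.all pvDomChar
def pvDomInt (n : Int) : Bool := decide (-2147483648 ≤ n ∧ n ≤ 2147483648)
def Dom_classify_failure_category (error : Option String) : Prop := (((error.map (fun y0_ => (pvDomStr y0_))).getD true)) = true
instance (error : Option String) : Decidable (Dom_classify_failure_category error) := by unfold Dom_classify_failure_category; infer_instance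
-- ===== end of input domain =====

-- A vs B: A is a chain of six per-category any-substring checks; B is a naive
-- multi-pattern scanner over the text positions aggregating the minimum category
-- priority. Objective: alternative algorithm (same cost class, different traversal).


-- ===== PORT A =====
-- literal transliteration of A: six if-blocks, each 'any(token in text for token in [...])'
def classify_failure_category (error : Option String) : String :=
  let text := PySem.Str.lower (error.getD "")
  if text = "" then "other"
  else if ["checkpoint", "account has been locked", "account locked", "restriction",
           "restricted", "throttle", "throttled", "banned", "ban "].any
          (fun token => PySem.Str.isIn token text) then "restriction/checkpoint"
  else if ["err_tunnel_connection_failed", "err_empty_response", "net::", "proxy",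
           "connection", "network", "timeout", "timed out", "tunnel"].any
          (fun token => PySem.Str.isIn token text) then "infra/transport"
  else if ["comments not opened", "write a comment", "could not open comments",
           "comment button"].any
          (fun token => PySem.Str.isIn token text) then "comment-open"
  else if ["typed text not visible", "text not visible", "comment input field",
           "input field not visible"].any
          (fun token => PySem.Str.isIn token text) then "input-visibility"
  else if ["comment not posted", "no comments are visible",
           "does not display any posted comments", "no posted comments"].any
          (fun token => PySem.Str.isIn token text) then "post-verification"
  else if ["post not visible", "page.goto", "navigation to", "comments section is empty",
           "could not determine if post loaded"].any
          (fun token => PySem.Str.isIn token text) then "page-load/navigation"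
  else "other"

-- ===== PORT B =====
-- B-side helpers: the label list and the flat (token, priority) list of Source B
def pvLabels : List String :=
  ["restriction/checkpoint", "infra/transport", "comment-open", "input-visibility",
   "post-verification", "page-load/navigation", "other"]

def pvTokens : List (String × Nat) :=
  [("checkpoint", 0), ("account has been locked", 0), ("account locked", 0),
   ("restriction", 0), ("restricted", 0), ("throttle", 0), ("throttled", 0),
   ("banned", 0), ("ban ", 0),
   ("err_tunnel_connection_failed", 1), ("err_empty_response", 1), ("net::", 1),
   ("proxy", 1), ("connection", 1), ("network", 1), ("timeout", 1),
   ("timed out", 1), ("tunnel", 1),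
   ("comments not opened", 2), ("write a comment", 2),
   ("could not open comments", 2), ("comment button", 2),
   ("typed text not visible", 3), ("text not visible", 3),
   ("comment input field", 3), ("input field not visible", 3),
   ("comment not posted", 4), ("no comments are visible", 4),
   ("does not display any posted comments", 4), ("no posted comments", 4),
   ("post not visible", 5), ("page.goto", 5), ("navigation to", 5),
   ("comments section is empty", 5), ("could not determine if post loaded", 5)]

-- the two nested loops of Source B: for i in range(len(text)): for token, pri in _TOKENS: …
-- text.startswith(token, i) with 0 ≤ i is exactly 'token.toList prefix of the drop at i'
def pvBestScan (cs : List Char) : Nat :=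
  (List.range cs.length).foldl
    (fun best i => pvTokens.foldl
      (fun b r => if r.2 < b ∧ (r.1.toList.isPrefixOf (cs.drop i)) = true then r.2 else b)
      best) 6

-- literal transliteration of B; '_LABELS[best]' is exact via getD since best ≤ 6 always
def classify_failure_category_alt (error : Option String) : String :=
  let text := PySem.Str.lower (error.getD "")
  pvLabels.getD (pvBestScan text.toList) "other"

-- ===== PRECONDITION & SPEC =====
def Spec_classify_failure_category (error : Option String) (out : String) : Prop := out = classify_failure_category_alt error
instance (error : Option String) (out : String) : Decidable (Spec_classify_failure_category error out) := by unfold Spec_classify_failure_category; infer_instance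

-- ===== CLAIM (what is proved, stated in full; the proofs are below) =====
def Claim_equal_classify_failure_category : Prop := ∀ (error : Option String), Dom_classify_failure_category error → Spec_classify_failure_category error (classify_failure_category error)

-- ===== LEMMAS AND PROOFS =====

-- foldl-min toolkit
theorem mf_le_init : ∀ (L : List Nat) (b : Nat), L.foldl min b ≤ b
  | [], _ => le_refl _
  | a :: t, b => le_trans (mf_le_init t (min b a)) (Nat.min_le_left b a)

theorem mf_le_mem : ∀ (L : List Nat) (b a : Nat), a ∈ L → L.foldl min b ≤ a := by
  intro L
  induction L with
  | nil => intro b a h; cases h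
  | cons x t ih =>
    intro b a h
    rcases List.mem_cons.mp h with h | h
    · subst h; exact le_trans (mf_le_init t (min b a)) (Nat.min_le_right b a)
    · exact ih (min b x) a h

theorem mf_mem : ∀ (L : List Nat) (b : Nat), L.foldl min b = b ∨ L.foldl min b ∈ L := by
  intro L
  induction L with
  | nil => intro b; left; rfl
  | cons x t ih =>
    intro b
    show List.foldl min (min b x) t = b ∨ List.foldl min (min b x) t ∈ x :: t
    rcases ih (min b x) with h | h
    · rcases min_cases b x with ⟨hm, _⟩ | ⟨hm, _⟩
      · left; rw [h, hm]
      · right; rw [h, hm]; exact List.mem_cons_self ..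
    · right; exact List.mem_cons_of_mem _ h

theorem mf_le_of_subset (L1 L2 : List Nat) (b : Nat) (h : ∀ a ∈ L1, a ∈ L2) :
    L2.foldl min b ≤ L1.foldl min b := by
  rcases mf_mem L1 b with h1 | h1
  · rw [h1]; exact mf_le_init L2 b
  · exact mf_le_mem L2 b _ (h _ h1)

theorem mf_ext (L1 L2 : List Nat) (b : Nat) (h : ∀ a, a ∈ L1 ↔ a ∈ L2) :
    L1.foldl min b = L2.foldl min b :=
  Nat.le_antisymm (mf_le_of_subset L2 L1 b (fun a ha => (h a).mpr ha))
    (mf_le_of_subset L1 L2 b (fun a ha => (h a).mp ha))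

-- a guarded min-update step is a conditional min
theorem step_eq (p b : Nat) (m : Bool) :
    (if p < b ∧ m = true then p else b) = (if m = true then min b p else b) := by
  by_cases hm : m = true <;> by_cases hp : p < b <;> simp [hm, hp] <;> omega

-- K1: a fold of conditional min-updates is a min-fold over the filtered priorities
theorem fold_cmin {ρ : Type} (l : List ρ) (c : ρ → Bool) (p : ρ → Nat) (b : Nat) :
    l.foldl (fun b r => if c r = true then min b (p r) else b) b
      = ((l.filter c).map p).foldl min b := by
  induction l generalizing b with
  | nil => rfl
  | cons r t ih => by_cases h : c r = true <;> simp [List.foldl, h, ih]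

-- K4: iterating min-folds is one min-fold over the concatenation
theorem fold_flat (il : List Nat) (P : Nat → List Nat) (b : Nat) :
    il.foldl (fun b i => (P i).foldl min b) b = (il.flatMap P).foldl min b := by
  induction il generalizing b with
  | nil => rfl
  | cons i t ih => simp [List.flatMap_cons, List.foldl_append, ih]

-- a nonempty token occurs in cs iff it is a prefix at some position < length
theorem pos_iff (t cs : List Char) (ht : t ≠ []) :
    (∃ i, i < cs.length ∧ t.isPrefixOf (cs.drop i) = true) ↔ PySem.Chars.isIn t cs = true := by
  rw [← PySem.Chars.exists_prefix_drop_iff_isIn]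
  constructor
  · rintro ⟨i, _, hp⟩; exact ⟨i, List.isPrefixOf_iff_prefix.mp hp⟩
  · rintro ⟨j, hp⟩
    by_cases hj : j < cs.length
    · exact ⟨j, hj, List.isPrefixOf_iff_prefix.mpr hp⟩
    · exact absurd (List.prefix_nil.mp (List.drop_eq_nil_of_le (le_of_not_gt hj) ▸ hp)) ht

theorem pvTokens_ne : ∀ r ∈ pvTokens, r.1.toList ≠ [] := by decide

-- characterisation of B's double loop: min over the tokens occurring anywhere in cs
theorem bestScan_char (cs : List Char) :
    pvBestScan cs
      = pvTokens.foldl (fun b r => if PySem.Chars.isIn r.1.toList cs = true then min b r.2 else b) 6 := by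
  unfold pvBestScan
  have h1 : ∀ (i : Nat) (b : Nat),
      pvTokens.foldl (fun b r => if r.2 < b ∧ (r.1.toList.isPrefixOf (cs.drop i)) = true then r.2 else b) b
        = ((pvTokens.filter (fun r => r.1.toList.isPrefixOf (cs.drop i))).map (·.2)).foldl min b := by
    intro i b
    have hf : (fun (b : Nat) (r : String × Nat) =>
        if r.2 < b ∧ (r.1.toList.isPrefixOf (cs.drop i)) = true then r.2 else b)
        = (fun b r => if (r.1.toList.isPrefixOf (cs.drop i)) = true then min b r.2 else b) := by
      funext b r; exact step_eq r.2 b _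
    rw [hf, fold_cmin]
  have h2 : (fun (b : Nat) (i : Nat) => pvTokens.foldl
      (fun b r => if r.2 < b ∧ (r.1.toList.isPrefixOf (cs.drop i)) = true then r.2 else b) b)
      = (fun b i => ((pvTokens.filter (fun r => r.1.toList.isPrefixOf (cs.drop i))).map (·.2)).foldl min b) := by
    funext b i; exact h1 i b
  rw [h2, fold_flat, fold_cmin]
  apply mf_ext
  intro a
  simp only [List.mem_flatMap, List.mem_map, List.mem_filter, List.mem_range]
  constructor
  · rintro ⟨i, hi, r, ⟨⟨hr, hp⟩, ha⟩⟩
    exact ⟨r, ⟨hr, (pos_iff _ cs (pvTokens_ne r hr)).mp ⟨i, hi, hp⟩⟩, ha⟩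
  · rintro ⟨r, ⟨⟨hr, hin⟩, ha⟩⟩
    obtain ⟨i, hi, hp⟩ := (pos_iff _ cs (pvTokens_ne r hr)).mpr hin
    exact ⟨i, hi, r, ⟨⟨hr, hp⟩, ha⟩⟩

-- folding one constant-priority group is a single conditional min
theorem group_fold (cs : List Char) (toks : List String) (k b : Nat) :
    ((toks.map (fun t => (t, k))).foldl
        (fun b r => if PySem.Chars.isIn r.1.toList cs = true then min b r.2 else b) b)
      = if toks.any (fun t => PySem.Chars.isIn t.toList cs) = true then min b k else b := by
  induction toks generalizing b with
  | nil => rfl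
  | cons t ts ih =>
    by_cases h : PySem.Chars.isIn t.toList cs = true
    · simp only [List.map_cons, List.foldl_cons, List.any_cons, h, if_pos, Bool.true_or, ih]
      split <;> omega
    · simp [h, ih]

-- pvTokens grouped by priority (the six category lists of A, in order)
theorem pvTokens_group : pvTokens =
    (["checkpoint", "account has been locked", "account locked", "restriction",
      "restricted", "throttle", "throttled", "banned", "ban "].map (fun t => (t, 0)))
    ++ (["err_tunnel_connection_failed", "err_empty_response", "net::", "proxy",
      "connection", "network", "timeout", "timed out", "tunnel"].map (fun t => (t, 1)))
    ++ (["comments not opened", "write a comment", "could not open comments",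
      "comment button"].map (fun t => (t, 2)))
    ++ (["typed text not visible", "text not visible", "comment input field",
      "input field not visible"].map (fun t => (t, 3)))
    ++ (["comment not posted", "no comments are visible",
      "does not display any posted comments", "no posted comments"].map (fun t => (t, 4)))
    ++ (["post not visible", "page.goto", "navigation to", "comments section is empty",
      "could not determine if post loaded"].map (fun t => (t, 5))) := rfl

theorem any_bridge (l : List String) (s : String) :
    l.any (fun t => PySem.Chars.isIn t.toList s.toList) = l.any (fun token => PySem.Str.isIn token s) := by
  simp [PySem.Str.isIn_eq]

-- ===== VERDICT (by name: the statement is the Claim_ definition above) =====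
set_option maxHeartbeats 1000000 in
theorem classify_failure_category_spec : Claim_equal_classify_failure_category := by
  intro error _
  unfold Spec_classify_failure_category
  simp only [classify_failure_category, classify_failure_category_alt]
  rw [bestScan_char, pvTokens_group]
  simp only [List.foldl_append, group_fold, any_bridge]
  by_cases h0 : PySem.Str.lower (error.getD "") = ""
  · simp only [h0]
    decide
  · by_cases h1 : (["checkpoint", "account has been locked", "account locked", "restriction", "restricted", "throttle", "throttled", "banned", "ban "].any (fun token => PySem.Str.isIn token (PySem.Str.lower (error.getD ""))) = true)
    · simp only [h0, h1]; simp [pvLabels, Nat.min_def]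
    · by_cases h2 : (["err_tunnel_connection_failed", "err_empty_response", "net::", "proxy", "connection", "network", "timeout", "timed out", "tunnel"].any (fun token => PySem.Str.isIn token (PySem.Str.lower (error.getD ""))) = true)
      · simp only [h0, h1, h2]; simp [pvLabels, Nat.min_def]
      · by_cases h3 : (["comments not opened", "write a comment", "could not open comments", "comment button"].any (fun token => PySem.Str.isIn token (PySem.Str.lower (error.getD ""))) = true)
        · simp only [h0, h1, h2, h3]; simp [pvLabels, Nat.min_def]
        · by_cases h4 : (["typed text not visible", "text not visible", "comment input field", "input field not visible"].any (fun token => PySem.Str.isIn token (PySem.Str.lower (error.getD ""))) = true)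
          · simp only [h0, h1, h2, h3, h4]; simp [pvLabels, Nat.min_def]
          · by_cases h5 : (["comment not posted", "no comments are visible", "does not display any posted comments", "no posted comments"].any (fun token => PySem.Str.isIn token (PySem.Str.lower (error.getD ""))) = true)
            · simp only [h0, h1, h2, h3, h4, h5]; simp [pvLabels, Nat.min_def]
            · by_cases h6 : (["post not visible", "page.goto", "navigation to", "comments section is empty", "could not determine if post loaded"].any (fun token => PySem.Str.isIn token (PySem.Str.lower (error.getD ""))) = true)
              · simp only [h0, h1, h2, h3, h4, h5, h6]; simp [pvLabels, Nat.min_def]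
              · simp only [h0, h1, h2, h3, h4, h5, h6]; simp [pvLabels, Nat.min_def]
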